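-- pv_equiv track=rewrite | github.com/philornot/Matura2026 | maj-2024-cala-drugi-raz/2_1.py | cyfry
-- ===== SOURCE A (Python) =====
-- def cyfry(n):
--     licznik = 0
--     b = 1
--     c = 0
--     while n > 0:
--         a = n % 10
--         n = n // 10
--         if a & 2 == 0:
--             c = c + (b * (a // 2))
--         else:
--             c = c + b
--             licznik += 1
--         b = b * 10
--     return c, licznik
-- ===== SOURCE B (Python) =====
-- def cyfry(n):
--     # Recursive Horner-style rebuild: combine most-significant part first,
--     # instead of A's least-significant-first loop with a power-of-ten accumulator.
--     if n <= 0: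
--         return (0, 0)
--     c, licznik = cyfry(n // 10)
--     d = n % 10
--     if d & 2:
--         return (10 * c + 1, licznik + 1)
--     return (10 * c + d // 2, licznik)
-- ===== Notes on version B (the rewrite author's own statement) =====
-- stated objective: simpler
-- what changed: Replaces the while loop that accumulates contributions least-significant-digit-first with an explicit power-of-ten place accumulator b by a structural recursion on the quotient that rebuilds the result Horner-style (shift the accumulated prefix one decimal place and add the transformed digit), needing no place tracking.
import Mathlib
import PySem

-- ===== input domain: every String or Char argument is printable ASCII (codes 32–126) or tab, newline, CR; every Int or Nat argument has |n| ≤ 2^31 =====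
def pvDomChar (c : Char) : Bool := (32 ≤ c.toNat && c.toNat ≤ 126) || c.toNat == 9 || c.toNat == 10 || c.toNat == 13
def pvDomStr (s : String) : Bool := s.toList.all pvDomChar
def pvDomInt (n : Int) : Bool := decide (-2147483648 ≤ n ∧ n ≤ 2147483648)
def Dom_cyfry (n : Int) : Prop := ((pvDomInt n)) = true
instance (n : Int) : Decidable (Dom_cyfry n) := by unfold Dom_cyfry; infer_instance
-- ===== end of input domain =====

-- B replaces A's least-significant-first while loop (place accumulator b = 10^i) by a
-- structural recursion on n // 10 that rebuilds the result Horner-style; return values agree.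

-- ===== PORT A =====
-- the while loop of A: state (n, b, c, licznik), literal branch order
def cyfryLoop (n b c licznik : Int) : Int × Int :=
  if h : n > 0 then
    let a := PySem.Int.mod n 10
    let n' := PySem.Int.floordiv n 10
    if PySem.Int.band a 2 = 0 then
      cyfryLoop n' (b * 10) (c + b * PySem.Int.floordiv a 2) licznik
    else
      cyfryLoop n' (b * 10) (c + b) (licznik + 1)
  else (c, licznik)
termination_by n.toNat
decreasing_by all_goals
  · rw [PySem.Int.floordiv_eq_ediv_of_pos (by omega : (0:Int) < 10)]
    omega

def cyfry (n : Int) : Int × Int := cyfryLoop n 1 0 0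

-- ===== PORT B =====
def cyfry_alt (n : Int) : Int × Int :=
  if h : n ≤ 0 then (0, 0)
  else
    let ck := cyfry_alt (PySem.Int.floordiv n 10)
    let d := PySem.Int.mod n 10
    if PySem.Int.band d 2 ≠ 0 then (10 * ck.1 + 1, ck.2 + 1)
    else (10 * ck.1 + PySem.Int.floordiv d 2, ck.2)
termination_by n.toNat
decreasing_by
  · rw [PySem.Int.floordiv_eq_ediv_of_pos (by omega : (0:Int) < 10)]
    omega

-- ===== PRECONDITION & SPEC =====
def Spec_cyfry (n : Int) (out : Int × Int) : Prop := out = cyfry_alt n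
instance (n : Int) (out : Int × Int) : Decidable (Spec_cyfry n out) := by unfold Spec_cyfry; infer_instance

-- ===== CLAIM (what is proved, stated in full; the proofs are below) =====
def Claim_equal_cyfry : Prop := ∀ (n : Int), Dom_cyfry n → Spec_cyfry n (cyfry n)

-- ===== LEMMAS AND PROOFS =====

-- the loop invariant: A's loop state relates to B's recursion Horner-style
theorem cyfryLoop_eq (n b c licznik : Int) :
    cyfryLoop n b c licznik =
      (c + b * (cyfry_alt n).1, licznik + (cyfry_alt n).2) := by
  induction n, b, c, licznik using cyfryLoop.induct with
  | case1 n b c licznik h a n' hband ih =>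
    have ih' : cyfryLoop (PySem.Int.floordiv n 10) (b * 10)
        (c + b * PySem.Int.floordiv (PySem.Int.mod n 10) 2) licznik =
        (c + b * PySem.Int.floordiv (PySem.Int.mod n 10) 2 +
          b * 10 * (cyfry_alt (PySem.Int.floordiv n 10)).1,
         licznik + (cyfry_alt (PySem.Int.floordiv n 10)).2) := ih
    have hb : PySem.Int.band (PySem.Int.mod n 10) 2 = 0 := hband
    rw [cyfryLoop, cyfry_alt]
    simp only [dif_pos h, dif_neg (by omega : ¬ n ≤ 0), hb, ne_eq,
      not_true_eq_false, if_false, ih']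
    simp only [if_true, Prod.mk.injEq]
    exact ⟨by ring, trivial⟩
  | case2 n b c licznik h a n' hband ih =>
    have ih' : cyfryLoop (PySem.Int.floordiv n 10) (b * 10) (c + b) (licznik + 1) =
        (c + b + b * 10 * (cyfry_alt (PySem.Int.floordiv n 10)).1,
         licznik + 1 + (cyfry_alt (PySem.Int.floordiv n 10)).2) := ih
    have hb : ¬ PySem.Int.band (PySem.Int.mod n 10) 2 = 0 := hband
    rw [cyfryLoop, cyfry_alt]
    simp only [dif_pos h, dif_neg (by omega : ¬ n ≤ 0), ne_eq, hb,
      not_false_eq_true, if_true, if_false, ih']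
    simp only [Prod.mk.injEq]
    exact ⟨by ring, by ring⟩
  | case3 n b c licznik h =>
    rw [cyfryLoop, cyfry_alt]
    simp only [dif_neg h, dif_pos (by omega : n ≤ 0)]
    simp

-- ===== VERDICT =====
theorem cyfry_spec : Claim_equal_cyfry := by
  intro n _
  unfold Spec_cyfry cyfry
  rw [cyfryLoop_eq]
  simp
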